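-- pv_equiv track=rewrite | github.com/jchy20/how-much-backtrack | reasoning-gym/reasoning_gym/arc/arc_1d_tasks.py | transform_fill_until_collision
-- ===== SOURCE A (Python) =====
-- def transform_fill_until_collision(input_grid: list[int]) -> list[int]:
--     size = len(input_grid)
--     # 1. Determine direction and marker position
--     if input_grid[0] == 5:
--         is_left = True
--         marker_pos = 0
--     elif input_grid[-1] == 5:
--         is_left = False
--         marker_pos = size - 1
--     else:
--         # no valid marker, return copy
--         return input_grid.copy()
--
--     # 2. Identify all pixel positions (non-zero except the marker)
--     pixel_positions = [i for i, v in enumerate(input_grid) if v != 0 and i != marker_pos]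
--     pixel_positions.sort()
--
--     # 3. Build the output by filling between marker/pixels
--     output = input_grid.copy()
--     if is_left:
--         prev = marker_pos
--         for pos in pixel_positions:
--             color = input_grid[pos]
--             for i in range(prev + 1, pos):
--                 output[i] = color
--             prev = pos
--     else:
--         prev = marker_pos
--         for pos in reversed(pixel_positions):
--             color = input_grid[pos]
--             for i in range(pos + 1, prev):
--                 output[i] = color
--             prev = pos
--
--     return output
-- ===== SOURCE B (Python) =====
-- def _fill_forward(cells):
--     """One pass: replace each zero with the last non-zero value seen so far (if any)."""
--     out = []
--     color = None
--     for v in cells: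
--         if v != 0:
--             color = v
--             out.append(v)
--         elif color is not None:
--             out.append(color)
--         else:
--             out.append(v)
--     return out
--
--
-- def transform_fill_until_collision(input_grid: list[int]) -> list[int]:
--     if input_grid[0] == 5:
--         # left marker: fill each zero with the nearest pixel color to its right
--         tail = input_grid[1:]
--         return [input_grid[0]] + _fill_forward(tail[::-1])[::-1]
--     if input_grid[-1] == 5:
--         # right marker: fill each zero with the nearest pixel color to its left
--         return _fill_forward(input_grid[:-1]) + [input_grid[-1]]
--     return input_grid.copy()
-- ===== Notes on version B (the rewrite author's own statement) =====
-- stated objective: simpler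
-- what changed: B drops A's pixel-position list, sort and gap-filling double loop, and instead does a single directional sweep that carries the last colour seen toward the marker (reversing the tail for a left marker), filling each zero with it.
import Mathlib
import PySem

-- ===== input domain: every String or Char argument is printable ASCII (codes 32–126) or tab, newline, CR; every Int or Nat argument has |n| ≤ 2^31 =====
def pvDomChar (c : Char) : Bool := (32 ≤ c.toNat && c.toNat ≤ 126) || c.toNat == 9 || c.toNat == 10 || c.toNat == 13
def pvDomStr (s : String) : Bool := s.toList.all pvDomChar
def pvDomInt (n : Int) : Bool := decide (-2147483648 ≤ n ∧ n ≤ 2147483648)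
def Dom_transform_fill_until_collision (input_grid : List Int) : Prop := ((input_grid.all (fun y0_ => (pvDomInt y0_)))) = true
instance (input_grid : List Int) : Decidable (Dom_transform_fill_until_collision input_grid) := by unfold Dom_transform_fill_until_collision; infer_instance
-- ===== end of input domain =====

-- B replaces A's pixel-position list + gap-filling double loop by one directional sweep
-- carrying the last colour seen (objective: simpler, same asymptotic cost).

-- ===== PORT A =====
-- literal port of A: collect and sort pixel positions, then fill each gap between
-- consecutive pixels (toward the marker) with the next pixel's colour.
-- output[i] = color is ported as pySetD (every written index is in range: prev+1..pos-1 < size).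
def transform_fill_until_collision (input_grid : List Int) : List Int :=
  let size : Int := PySem.List.len input_grid
  if PySem.List.pyGet? input_grid 0 = some 5 then
    let marker_pos : Int := 0
    let pixel_positions :=
      ((PySem.List.enumerate input_grid 0).filter
        (fun p => decide (p.2 ≠ 0) && decide (p.1 ≠ marker_pos))).map (·.1)
    let pixel_positions := PySem.List.sorted pixel_positions (fun x => x) false
    (pixel_positions.foldl
      (fun (st : List Int × Int) pos =>
        let color := PySem.List.pyGetD input_grid pos 0
        ((PySem.List.pyRange (st.2 + 1) pos 1).foldl
          (fun o i => PySem.List.pySetD o i color) st.1, pos))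
      (input_grid, marker_pos)).1
  else if PySem.List.pyGet? input_grid (-1) = some 5 then
    let marker_pos : Int := size - 1
    let pixel_positions :=
      ((PySem.List.enumerate input_grid 0).filter
        (fun p => decide (p.2 ≠ 0) && decide (p.1 ≠ marker_pos))).map (·.1)
    let pixel_positions := PySem.List.sorted pixel_positions (fun x => x) false
    (pixel_positions.reverse.foldl
      (fun (st : List Int × Int) pos =>
        let color := PySem.List.pyGetD input_grid pos 0
        ((PySem.List.pyRange (pos + 1) st.2 1).foldl
          (fun o i => PySem.List.pySetD o i color) st.1, pos))
      (input_grid, marker_pos)).1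
  else input_grid

-- ===== PORT B =====
-- Source B's _fill_forward: one pass, each zero becomes the last non-zero value seen (if any).
def fillForward (color : Option Int) (cells : List Int) : List Int :=
  match cells with
  | [] => []
  | v :: rest =>
    if v ≠ 0 then v :: fillForward (some v) rest
    else match color with
      | some c => c :: fillForward color rest
      | none => v :: fillForward color rest

-- tail[::-1] (= reverse, PySem.List.slice?_none_none_neg_one) is written .reverse.
def transform_fill_until_collision_alt (input_grid : List Int) : List Int :=
  if PySem.List.pyGet? input_grid 0 = some 5 then
    let tail := PySem.List.slice input_grid (some 1) none
    [PySem.List.pyGetD input_grid 0 0] ++ (fillForward none tail.reverse).reverse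
  else if PySem.List.pyGet? input_grid (-1) = some 5 then
    fillForward none (PySem.List.slice input_grid none (some (-1))) ++
      [PySem.List.pyGetD input_grid (-1) 0]
  else input_grid

-- ===== PRECONDITION & SPEC =====
-- Python A raises IndexError on the empty list (input_grid[0]); B raises there too.
def Pre_transform_fill_until_collision (input_grid : List Int) : Prop := input_grid ≠ []
instance (input_grid : List Int) : Decidable (Pre_transform_fill_until_collision input_grid) := by
  unfold Pre_transform_fill_until_collision; infer_instance

def pvWitness_transform_fill_until_collision : List Int := [5, 0, 2, 0, 0, 3, 0]

def Spec_transform_fill_until_collision (input_grid : List Int) (out : List Int) : Prop :=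
  out = transform_fill_until_collision_alt input_grid
instance (input_grid : List Int) (out : List Int) :
    Decidable (Spec_transform_fill_until_collision input_grid out) := by
  unfold Spec_transform_fill_until_collision; infer_instance

-- ===== CLAIM (what is proved, stated in full; the proofs are below) =====
def Claim_equal_transform_fill_until_collision : Prop :=
  ∀ (input_grid : List Int), Dom_transform_fill_until_collision input_grid →
    Pre_transform_fill_until_collision input_grid →
    Spec_transform_fill_until_collision input_grid (transform_fill_until_collision input_grid)

-- ===== LEMMAS AND PROOFS =====

-- nonzero test used throughout
def nzP : Int → Bool := fun x => decide (x ≠ 0)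

-- spec of the left-marker result: each zero becomes the first non-zero to its RIGHT (or stays 0)
def nf : List Int → List Int
  | [] => []
  | v :: rest => (if v = 0 then ((rest.find? nzP).getD 0) else v) :: nf rest

-- spec of the right-marker result: each zero becomes the last non-zero seen so far (carry c, 0 = none)
def pf (c : Int) : List Int → List Int
  | [] => []
  | v :: rest => (if v = 0 then c else v) :: pf (if v = 0 then c else v) rest

-- carry state of fillForward after a list
def ffCarry (c : Option Int) : List Int → Option Int
  | [] => c
  | v :: rest => ffCarry (if v ≠ 0 then some v else c) rest

theorem nf_length (l : List Int) : (nf l).length = l.length := by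
  induction l with
  | nil => rfl
  | cons v rest ih => simp [nf, ih]

theorem pf_length (c : Int) (l : List Int) : (pf c l).length = l.length := by
  induction l generalizing c with
  | nil => rfl
  | cons v rest ih => simp [pf, ih]

theorem fillForward_eq_pf (c : Option Int) (l : List Int) :
    fillForward c l = pf (c.getD 0) l := by
  induction l generalizing c with
  | nil => cases c <;> rfl
  | cons v rest ih =>
    by_cases hv : v = 0
    · cases c <;> simp [fillForward, pf, hv, ih]
    · simp [fillForward, pf, hv, ih]


theorem ffCarry_append (c : Option Int) (a b : List Int) :
    ffCarry c (a ++ b) = ffCarry (ffCarry c a) b := by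
  induction a generalizing c with
  | nil => rfl
  | cons v rest ih => simp [ffCarry, ih]


theorem fillForward_append (c : Option Int) (a b : List Int) :
    fillForward c (a ++ b) = fillForward c a ++ fillForward (ffCarry c a) b := by
  induction a generalizing c with
  | nil => rfl
  | cons v rest ih =>
    by_cases hv : v = 0
    · cases c <;> simp [fillForward, ffCarry, hv, ih]
    · simp [fillForward, ffCarry, hv, ih]


theorem ffCarry_reverse (c : Option Int) (l : List Int) :
    ffCarry c l.reverse = match l.find? nzP with | some x => some x | none => c := by
  induction l generalizing c with
  | nil => rfl
  | cons v rest ih =>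
    rw [List.reverse_cons, ffCarry_append, ih]
    by_cases hv : v = 0
    · simp [List.find?, nzP, hv, ffCarry]
    · simp [List.find?, nzP, hv, ffCarry]


-- B's left sweep computes nf
theorem revFill_eq_nf (l : List Int) :
    (fillForward none l.reverse).reverse = nf l := by
  induction l with
  | nil => rfl
  | cons v rest ih =>
    rw [List.reverse_cons, fillForward_append, List.reverse_append, ih, ffCarry_reverse]
    by_cases hv : v = 0
    · cases hf : rest.find? nzP <;> simp [fillForward, nf, hv, hf]
    · cases hf : rest.find? nzP <;> simp [fillForward, nf, hv]


-- pf over an append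
theorem pf_append (c : Int) (a b : List Int) :
    pf c (a ++ b) = pf c a ++ pf (a.foldl (fun c v => if v = 0 then c else v) c) b := by
  induction a generalizing c with
  | nil => rfl
  | cons v rest ih => by_cases hv : v = 0 <;> simp [pf, hv, ih]


theorem nf_getElem? (l : List Int) (k : Nat) (h : k < l.length) :
    (nf l)[k]? = some (if l[k] = 0 then ((l.drop (k+1)).find? nzP).getD 0 else l[k]) := by
  induction l generalizing k with
  | nil => simp at h
  | cons v rest ih =>
    cases k with
    | zero => simp [nf]
    | succ k => simpa [nf] using ih k (by simpa using h)


theorem pf_getElem? (c : Int) (l : List Int) (k : Nat) (h : k < l.length) :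
    (pf c l)[k]? = some (if l[k] = 0 then (((l.take k).reverse).find? nzP).getD c else l[k]) := by
  induction l generalizing k c with
  | nil => simp at h
  | cons v rest ih =>
    cases k with
    | zero => simp [pf]
    | succ k =>
      rw [show (v :: rest).take (k+1) = v :: rest.take k from rfl]
      rw [List.reverse_cons, List.find?_append]
      by_cases hv : v = 0
      · simpa [pf, hv, nzP, List.find?] using ih c k (by simpa using h)
      · simpa [pf, hv, nzP, List.find?] using ih v k (by simpa using h)


-- find? finds the first non-zero element
theorem find?_first (l : List Int) (j : Nat) (hj : j < l.length)
    (hz : ∀ m : Nat, (hm : m < j) → l[m]'(by omega) = 0) (hnz : l[j] ≠ 0) :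
    l.find? nzP = some l[j] := by
  induction l generalizing j with
  | nil => simp at hj
  | cons v rest ih =>
    cases j with
    | zero =>
      have hv : v ≠ 0 := by simpa using hnz
      simp [List.find?, nzP, hv]
    | succ j =>
      have h0 : v = 0 := hz 0 (Nat.succ_pos j)
      have := ih j (by simpa using hj) (fun m hm => hz (m+1) (by omega)) (by simpa using hnz)
      simpa [List.find?, nzP, h0] using this


theorem find?_none (l : List Int) (hz : ∀ m : Nat, (hm : m < l.length) → l[m] = 0) :
    l.find? nzP = none := by
  induction l with
  | nil => rfl
  | cons v rest ih =>
    have h0 : v = 0 := hz 0 (Nat.succ_pos _)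
    simp [List.find?, nzP, h0]
    intro x hx
    obtain ⟨m, hm, rfl⟩ := List.mem_iff_getElem.mp hx
    have h := hz (m+1) (by simp; omega)
    simpa using h


-- the range-write loop preserves length
theorem setRange_length (out : List Int) (a b c : Int) :
    ((PySem.List.pyRange a b 1).foldl (fun o i => PySem.List.pySetD o i c) out).length = out.length := by
  generalize (PySem.List.pyRange a b 1) = l
  induction l generalizing out with
  | nil => rfl
  | cons x xs ih => simp [ih, PySem.List.length_pySetD]

-- writing a constant on range(a, b): pointwise effect
theorem setRange_getElem? (out : List Int) (a b c : Int) (ha : 0 ≤ a) (k : Nat) :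
    ((PySem.List.pyRange a b 1).foldl (fun o i => PySem.List.pySetD o i c) out)[k]? =
      if a ≤ (k : Int) ∧ (k : Int) < b then (out[k]?).map (fun _ => c) else out[k]? := by
  induction hn : (b - a).toNat generalizing a out with
  | zero =>
    have hab : b ≤ a := by omega
    rw [PySem.List.pyRange_one_eq_nil hab]
    have hno : ¬(a ≤ (k : Int) ∧ (k : Int) < b) := by omega
    simp [hno]
  | succ n ih =>
    have hab : a < b := by omega
    rw [PySem.List.pyRange_one_cons hab]
    simp only [List.foldl_cons]
    rw [ih (PySem.List.pySetD out a c) (a+1) (by omega) (by omega)]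
    rw [PySem.List.pySetD_of_nonneg out c ha]
    by_cases hk : (k : Int) = a
    · have hne : ¬(a + 1 ≤ (k : Int) ∧ (k : Int) < b) := by omega
      have hcond : a ≤ (k : Int) ∧ (k : Int) < b := by omega
      have hka : a.toNat = k := by omega
      simp only [if_neg hne, if_pos hcond, List.getElem?_set, hka, if_true]
      by_cases hlen : k < out.length
      · simp [hlen]
      · simp [hlen]
    · have hka : ¬ (a.toNat = k) := by omega
      have hiff : ((a + 1 ≤ (k : Int) ∧ (k : Int) < b) ↔ (a ≤ (k : Int) ∧ (k : Int) < b)) := by omega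
      rw [List.getElem?_set, if_neg hka]
      by_cases hcond : a ≤ (k : Int) ∧ (k : Int) < b
      · simp [hcond, hiff.mpr hcond]
      · have h2 : ¬(a + 1 ≤ (k : Int) ∧ (k : Int) < b) := fun h => hcond (hiff.mp h)
        simp only [if_neg hcond, if_neg h2]

-- the left-marker loop invariant
theorem loopL (g : List Int) (ps : List Int) (out : List Int) (prev : Int)
    (hprev : 0 ≤ prev)
    (hlen : out.length = g.length)
    (hle : ∀ k : Nat, (k : Int) ≤ prev → out[k]? = (nf g)[k]?)
    (hgt : ∀ k : Nat, prev < (k : Int) → out[k]? = g[k]?)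
    (hps : ∀ j : Int, j ∈ ps ↔ prev < j ∧ ∃ k : Nat, j = (k : Int) ∧ ∃ hk : k < g.length, g[k] ≠ 0)
    (hsort : ps.Pairwise (· < ·)) :
    (ps.foldl
      (fun (st : List Int × Int) pos =>
        ((PySem.List.pyRange (st.2 + 1) pos 1).foldl
          (fun o i => PySem.List.pySetD o i (PySem.List.pyGetD g pos 0)) st.1, pos))
      (out, prev)).1 = nf g := by
  induction ps generalizing out prev with
  | nil =>
    simp only [List.foldl_nil]
    apply List.ext_getElem?
    intro k
    by_cases hk : (k : Int) ≤ prev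
    · exact hle k hk
    · rw [hgt k (by omega)]
      by_cases hklen : k < g.length
      · rw [nf_getElem? g k hklen, List.getElem?_eq_getElem hklen]
        by_cases hgz : g[k] = 0
        · have hfind : (g.drop (k+1)).find? nzP = none := by
            apply find?_none
            intro m hm
            rw [List.getElem_drop]
            by_contra hnz2
            have hmem := (hps ((k+1+m : Nat) : Int)).mpr
              ⟨by push_cast; omega, k+1+m, rfl, by rw [List.length_drop] at hm; omega, hnz2⟩
            exact absurd hmem (List.not_mem_nil)
          simp [hgz, hfind]
        · simp [hgz]
      · rw [List.getElem?_eq_none (by omega), List.getElem?_eq_none (by rw [nf_length]; omega)]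
  | cons pos ps' ih =>
    obtain ⟨hppos, k0, rfl, hk0len, hk0nz⟩ := (hps pos).mp List.mem_cons_self
    obtain ⟨hhead, htail⟩ := List.pairwise_cons.mp hsort
    have hcolor : PySem.List.pyGetD g ((k0 : Nat) : Int) 0 = g[k0] := by
      simp [List.getD_eq_getElem?_getD, List.getElem?_eq_getElem hk0len]
    have hgap : ∀ m : Nat, prev < (m : Int) → (m : Int) < (k0 : Int) → (hm : m < g.length) → g[m] = 0 := by
      intro m h1 h2 hm
      by_contra hnz2
      have hm2 := (hps m).mpr ⟨h1, m, rfl, hm, hnz2⟩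
      rcases List.mem_cons.mp hm2 with h | h
      · omega
      · have := hhead _ h
        omega
    simp only [List.foldl_cons]
    apply ih _ (k0 : Int) (by omega)
    · rw [setRange_length]; exact hlen
    · intro k hk
      rw [setRange_getElem? out (prev+1) (k0 : Int) _ (by omega) k]
      by_cases hc : prev + 1 ≤ (k : Int) ∧ (k : Int) < (k0 : Int)
      · rw [if_pos hc, hgt k (by omega)]
        have hklen : k < g.length := by omega
        rw [List.getElem?_eq_getElem hklen, nf_getElem? g k hklen]
        have hgz : g[k] = 0 := hgap k (by omega) (by omega) hklen
        have hdroplen : k0 - (k+1) < (g.drop (k+1)).length := by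
          rw [List.length_drop]; omega
        have hfz : ∀ m : Nat, (hm : m < k0 - (k+1)) → (g.drop (k+1))[m]'(by rw [List.length_drop]; omega) = 0 := by
          intro m hm
          rw [List.getElem_drop]
          exact hgap (k+1+m) (by omega) (by omega) (by omega)
        have hidx : (g.drop (k+1))[k0-(k+1)]'hdroplen = g[k0] := by
          have h1 : (g.drop (k+1))[k0-(k+1)]? = g[(k+1)+(k0-(k+1))]? := List.getElem?_drop
          rw [List.getElem?_eq_getElem hdroplen, List.getElem?_eq_getElem (by omega : k+1+(k0-(k+1)) < g.length)] at h1
          have heq : (k+1)+(k0-(k+1)) = k0 := by omega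
          simpa [heq] using h1
        have hfind : (g.drop (k+1)).find? nzP = some g[k0] := by
          rw [find?_first _ _ hdroplen hfz (by rw [hidx]; exact hk0nz), hidx]
        simp [hgz, hfind, hcolor]
      · rw [if_neg hc]
        by_cases hkprev : (k : Int) ≤ prev
        · exact hle k hkprev
        · have hkk0 : k = k0 := by omega
          subst hkk0
          rw [hgt k (by omega), List.getElem?_eq_getElem hk0len, nf_getElem? g k hk0len]
          simp [hk0nz]
    · intro k hk
      rw [setRange_getElem? out (prev+1) (k0 : Int) _ (by omega) k]
      rw [if_neg (by omega)]
      exact hgt k (by omega)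
    · intro j
      constructor
      · intro hj
        have hj2 := (hps j).mp (List.mem_cons_of_mem _ hj)
        exact ⟨hhead _ hj, hj2.2⟩
      · rintro ⟨h1, h2⟩
        have hmem : j ∈ (k0 : Int) :: ps' := (hps j).mpr ⟨by omega, h2⟩
        rcases List.mem_cons.mp hmem with h | h
        · omega
        · exact h
    · exact htail

-- the right-marker loop invariant
theorem loopR (g : List Int) (ps : List Int) (out : List Int) (prev : Int)
    (hprev : prev ≤ (g.length : Int) - 1)
    (hlen : out.length = g.length)
    (hge : ∀ k : Nat, prev ≤ (k : Int) → out[k]? = (pf 0 g)[k]?)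
    (hlt : ∀ k : Nat, (k : Int) < prev → out[k]? = g[k]?)
    (hps : ∀ j : Int, j ∈ ps ↔ j < prev ∧ ∃ k : Nat, j = (k : Int) ∧ ∃ hk : k < g.length, g[k] ≠ 0)
    (hsort : ps.Pairwise (· > ·)) :
    (ps.foldl
      (fun (st : List Int × Int) pos =>
        ((PySem.List.pyRange (pos + 1) st.2 1).foldl
          (fun o i => PySem.List.pySetD o i (PySem.List.pyGetD g pos 0)) st.1, pos))
      (out, prev)).1 = pf 0 g := by
  induction ps generalizing out prev with
  | nil =>
    simp only [List.foldl_nil]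
    apply List.ext_getElem?
    intro k
    by_cases hk : prev ≤ (k : Int)
    · exact hge k hk
    · rw [hlt k (by omega)]
      have hklen : k < g.length := by omega
      rw [pf_getElem? 0 g k hklen, List.getElem?_eq_getElem hklen]
      by_cases hgz : g[k] = 0
      · have htk : (g.take k).length = k := by simp [List.length_take]; omega
        have hfind : ((g.take k).reverse).find? nzP = none := by
          apply find?_none
          intro m hm
          rw [List.length_reverse, htk] at hm
          rw [List.getElem_reverse, List.getElem_take]
          simp only [htk]
          by_contra hnz2
          have hmem := (hps ((k - 1 - m : Nat) : Int)).mpr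
            ⟨by omega, k - 1 - m, rfl, by omega, hnz2⟩
          exact absurd hmem (List.not_mem_nil)
        simp [hgz, hfind]
      · simp [hgz]
  | cons pos ps' ih =>
    obtain ⟨hppos, k0, rfl, hk0len, hk0nz⟩ := (hps pos).mp List.mem_cons_self
    obtain ⟨hhead, htail⟩ := List.pairwise_cons.mp hsort
    have hcolor : PySem.List.pyGetD g ((k0 : Nat) : Int) 0 = g[k0] := by
      simp [List.getD_eq_getElem?_getD, List.getElem?_eq_getElem hk0len]
    have hgap : ∀ m : Nat, (k0 : Int) < (m : Int) → (m : Int) < prev → (hm : m < g.length) → g[m] = 0 := by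
      intro m h1 h2 hm
      by_contra hnz2
      have hm2 := (hps m).mpr ⟨h2, m, rfl, hm, hnz2⟩
      rcases List.mem_cons.mp hm2 with h | h
      · omega
      · have := hhead _ h
        omega
    simp only [List.foldl_cons]
    apply ih _ (k0 : Int) (by omega)
    · rw [setRange_length]; exact hlen
    · intro k hk
      rw [setRange_getElem? out ((k0 : Int)+1) prev _ (by omega) k]
      by_cases hc : (k0 : Int) + 1 ≤ (k : Int) ∧ (k : Int) < prev
      · rw [if_pos hc, hlt k (by omega)]
        have hklen : k < g.length := by omega
        rw [List.getElem?_eq_getElem hklen, pf_getElem? 0 g k hklen]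
        have hgz : g[k] = 0 := hgap k (by omega) (by omega) hklen
        have htklen : (g.take k).length = k := by simp [List.length_take]; omega
        have hdl : k - 1 - k0 < ((g.take k).reverse).length := by
          simp [htklen]; omega
        have hfz : ∀ m : Nat, (hm : m < k - 1 - k0) → ((g.take k).reverse)[m]'(by simp [htklen]; omega) = 0 := by
          intro m hm
          rw [List.getElem_reverse, List.getElem_take]
          simp only [htklen]
          exact hgap (k - 1 - m) (by omega) (by omega) (by omega)
        have hidx : ((g.take k).reverse)[k - 1 - k0]'hdl = g[k0] := by
          rw [List.getElem_reverse, List.getElem_take]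
          simp only [htklen]
          have heq : k - 1 - (k - 1 - k0) = k0 := by omega
          simp [heq]
        have hfind : ((g.take k).reverse).find? nzP = some g[k0] := by
          rw [find?_first _ _ hdl hfz (by rw [hidx]; exact hk0nz), hidx]
        simp [hgz, hfind, hcolor]
      · rw [if_neg hc]
        by_cases hkprev : prev ≤ (k : Int)
        · exact hge k hkprev
        · have hkk0 : k = k0 := by omega
          subst hkk0
          rw [hlt k (by omega), List.getElem?_eq_getElem hk0len, pf_getElem? 0 g k hk0len]
          simp [hk0nz]
    · intro k hk
      rw [setRange_getElem? out ((k0 : Int)+1) prev _ (by omega) k]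
      rw [if_neg (by omega)]
      exact hlt k (by omega)
    · intro j
      constructor
      · intro hj
        have hj2 := (hps j).mp (List.mem_cons_of_mem _ hj)
        exact ⟨hhead _ hj, hj2.2⟩
      · rintro ⟨h1, h2⟩
        have hmem : j ∈ (k0 : Int) :: ps' := (hps j).mpr ⟨by omega, h2⟩
        rcases List.mem_cons.mp hmem with h | h
        · omega
        · exact h
    · exact htail

-- membership in A's pixel-position list
theorem memP (g : List Int) (mp j : Int) :
    (j ∈ ((PySem.List.enumerate g 0).filter
        (fun p => decide (p.2 ≠ 0) && decide (p.1 ≠ mp))).map (·.1)) ↔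
      (j ≠ mp ∧ ∃ k : Nat, j = (k : Int) ∧ ∃ hk : k < g.length, g[k] ≠ 0) := by
  simp only [List.mem_map, List.mem_filter, PySem.List.mem_enumerate_iff]
  constructor
  · rintro ⟨p, ⟨⟨k, hk, rfl⟩, hpred⟩, rfl⟩
    simp only [Bool.and_eq_true, decide_eq_true_eq] at hpred
    exact ⟨by simpa using hpred.2, k, by simp, hk, hpred.1⟩
  · rintro ⟨hmp, k, rfl, hk, hnz⟩
    exact ⟨((k : Int), g[k]), ⟨⟨k, hk, by simp⟩, by simp [hnz, hmp]⟩, rfl⟩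

-- A's pixel-position list is strictly increasing
theorem pairwiseP (g : List Int) (mp : Int) :
    (((PySem.List.enumerate g 0).filter
        (fun p => decide (p.2 ≠ 0) && decide (p.1 ≠ mp))).map (·.1)).Pairwise (· < ·) := by
  rw [List.pairwise_map]
  exact (PySem.List.pairwise_lt_enumerate g 0).filter _

-- ===== VERDICT (by name: the statement is the Claim_ definition above) =====
theorem transform_fill_until_collision_spec : Claim_equal_transform_fill_until_collision := by
  intro g hdom hpre
  unfold Spec_transform_fill_until_collision
  unfold Pre_transform_fill_until_collision at hpre
  unfold transform_fill_until_collision transform_fill_until_collision_alt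
  have hglen : 0 < g.length := List.length_pos_iff.mpr hpre
  by_cases h0 : PySem.List.pyGet? g 0 = some 5
  · -- left marker
    have hg0 : g[0] = 5 := by
      rw [PySem.List.pyGet?_zero, List.getElem?_eq_getElem hglen] at h0
      exact Option.some.inj h0
    simp only [h0, if_pos]
    have hsorted := PySem.List.sorted_eq_self_of_pairwise
      (xs := ((PySem.List.enumerate g 0).filter
        (fun p => decide (p.2 ≠ 0) && decide (p.1 ≠ (0 : Int)))).map (·.1))
      (key := fun x => x) (((pairwiseP g 0).imp (fun h => le_of_lt h)))
    rw [hsorted]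
    rw [loopL g _ g 0 le_rfl rfl ?hle ?hgt ?hps (pairwiseP g 0)]
    case hle =>
      intro k hk
      have hk0 : k = 0 := by omega
      subst hk0
      rw [List.getElem?_eq_getElem hglen,
        nf_getElem? g 0 hglen]
      simp [hg0]
    case hgt => intro _ _; rfl
    case hps =>
      intro j
      rw [memP]
      constructor
      · rintro ⟨hne, k, rfl, hk, hnz⟩
        exact ⟨by omega, k, rfl, hk, hnz⟩
      · rintro ⟨hpos, k, rfl, hk, hnz⟩
        exact ⟨by omega, k, rfl, hk, hnz⟩
    -- B side
    rw [PySem.List.slice_from_one]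
    have hB : (fillForward none g.tail.reverse).reverse = nf g.tail := revFill_eq_nf g.tail
    rw [hB]
    obtain ⟨h, t, rfl⟩ : ∃ h t, g = h :: t := ⟨g.head hpre, g.tail, (List.cons_head_tail hpre).symm⟩
    have hh : h = 5 := by simpa using hg0
    simp [nf, PySem.List.pyGetD_zero_cons, hh]
  · by_cases h1 : PySem.List.pyGet? g (-1) = some 5
    · -- right marker
      have hlast : g[g.length - 1]'(by omega) = 5 := by
        rw [PySem.List.pyGet?_neg_one, List.getLast?_eq_getElem?,
          List.getElem?_eq_getElem (by omega)] at h1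
        exact Option.some.inj h1
      simp only [h0, h1, reduceIte]
      have hsorted := PySem.List.sorted_eq_self_of_pairwise
        (xs := ((PySem.List.enumerate g 0).filter
          (fun p => decide (p.2 ≠ 0) && decide (p.1 ≠ ((PySem.List.len g) - 1)))).map (·.1))
        (key := fun x => x) (((pairwiseP g ((PySem.List.len g) - 1)).imp (fun h => le_of_lt h)))
      rw [hsorted]
      rw [loopR g _ g ((PySem.List.len g) - 1) (by simp) rfl ?hge ?hlt ?hps ?hsort]
      case hge =>
        intro k hk
        simp only [PySem.List.len_eq] at hk
        by_cases hklen : k < g.length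
        · have hkk : k = g.length - 1 := by omega
          subst hkk
          rw [List.getElem?_eq_getElem hklen, pf_getElem? 0 g _ hklen]
          simp [hlast]
        · rw [List.getElem?_eq_none (by omega), List.getElem?_eq_none (by rw [pf_length]; omega)]
      case hlt => intro _ _; rfl
      case hps =>
        intro j
        rw [List.mem_reverse, memP]
        simp only [PySem.List.len_eq]
        constructor
        · rintro ⟨hne, k, rfl, hk, hnz⟩
          exact ⟨by omega, k, rfl, hk, hnz⟩
        · rintro ⟨hlt2, k, rfl, hk, hnz⟩
          exact ⟨by omega, k, rfl, hk, hnz⟩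
      case hsort =>
        rw [List.pairwise_reverse]
        exact (pairwiseP g _)
      -- B side
      rw [PySem.List.slice_to_neg_one, PySem.List.pyGetD_neg_one g 0 hpre,
        List.getLast_eq_getElem, hlast]
      rw [fillForward_eq_pf]
      have hsplit : g.dropLast ++ [(5 : Int)] = g := by
        have := List.dropLast_append_getLast hpre
        rw [List.getLast_eq_getElem, hlast] at this
        exact this
      conv_lhs => rw [← hsplit]
      rw [pf_append]
      simp [pf]
    · simp [h0, h1]
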